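-- pv_equiv track=rewrite | github.com/stroitzsch/TEASER | teaser/createxml.py | check
-- ===== SOURCE A (Python) =====
-- def check(line):
-- 	string = ""
-- 	suffix = ""
-- 	for i in line:
-- 		if(i == "("):
-- 			suffix += i
-- 		elif (i == "U"):
-- 			suffix += i
-- 			if suffix == "(U":
-- 				break
-- 		else:
-- 			string += i
-- 	return string
-- ===== SOURCE B (Python) =====
-- def _split_first(s):
--     # split s at its first "(" or "U": (prefix, that char, rest); ("", "", "") style when absent
--     for j, c in enumerate(s):
--         if c == "(" or c == "U":
--             return s[:j], c, s[j + 1:]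
--     return s, "", ""
--
--
-- def _strip_specials(s):
--     return "".join(c for c in s if c != "(" and c != "U")
--
--
-- def check(line):
--     head, sep, tail = _split_first(line)
--     if sep == "(":
--         head2, sep2, _ = _split_first(tail)
--         if sep2 == "U":
--             return head + head2
--     if sep == "":
--         return head
--     return head + _strip_specials(tail)
-- ===== Notes on version B (the rewrite author's own statement) =====
-- stated objective: alternative
-- what changed: Replaces A's single interleaved accumulate-and-break loop carrying a growing suffix state with a split-at-first-special decomposition: locate the first special character (and, after '(', the second), then assemble the answer from the clean prefixes and a filtered remainder.
import Mathlib
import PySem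

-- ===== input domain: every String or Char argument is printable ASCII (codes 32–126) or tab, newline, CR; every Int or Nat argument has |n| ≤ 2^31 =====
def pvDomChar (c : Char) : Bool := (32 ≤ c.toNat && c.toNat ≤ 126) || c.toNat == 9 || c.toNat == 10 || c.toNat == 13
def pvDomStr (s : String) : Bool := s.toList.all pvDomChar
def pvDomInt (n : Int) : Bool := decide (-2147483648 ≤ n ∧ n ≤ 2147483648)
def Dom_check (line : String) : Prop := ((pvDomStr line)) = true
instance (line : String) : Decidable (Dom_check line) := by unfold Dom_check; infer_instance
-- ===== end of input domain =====

-- B splits the line at the first special character ("(" or "U") instead of A's interleaved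
-- accumulate-and-break loop; same result, stated and proved equal below (objective: alternative).


-- ===== PORT A =====
-- A's for-loop over the characters, carrying (string, suffix); "break" returns string.
def checkGo : List Char → List Char → List Char → List Char
  | [], string, _ => string
  | i :: rest, string, suffix =>
    if i = '(' then checkGo rest string (suffix ++ [i])
    else if i = 'U' then
      if suffix ++ [i] = ['(', 'U'] then string
      else checkGo rest string (suffix ++ [i])
    else checkGo rest (string ++ [i]) suffix

def check (line : String) : String := String.ofList (checkGo line.toList [] [])

-- ===== PORT B =====
-- Source B's _split_first: scan for the first "(" or "U"; (prefix, optional char, rest).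
def splitFirstSpecial : List Char → List Char × Option Char × List Char
  | [] => ([], none, [])
  | c :: r =>
    if c = '(' ∨ c = 'U' then ([], some c, r)
    else
      let p := splitFirstSpecial r
      (c :: p.1, p.2.1, p.2.2)

-- Source B's _strip_specials
def stripSpecials (s : List Char) : List Char := s.filter (fun c => c ≠ '(' ∧ c ≠ 'U')

def altCore (cs : List Char) : List Char :=
  let p := splitFirstSpecial cs
  if p.2.1 = some '(' then
    let q := splitFirstSpecial p.2.2
    if q.2.1 = some 'U' then p.1 ++ q.1
    else p.1 ++ stripSpecials p.2.2
  else if p.2.1 = none then p.1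
  else p.1 ++ stripSpecials p.2.2

def check_alt (line : String) : String := String.ofList (altCore line.toList)

-- ===== PRECONDITION & SPEC =====
def Spec_check (line : String) (out : String) : Prop := out = check_alt line
instance (line : String) (out : String) : Decidable (Spec_check line out) := by unfold Spec_check; infer_instance

-- ===== CLAIM (what is proved, stated in full; the proofs are below) =====
def Claim_equal_check : Prop := ∀ (line : String), Dom_check line → Spec_check line (check line)

-- ===== LEMMAS AND PROOFS =====

theorem stripSpecials_cons (c : Char) (r : List Char) :
    stripSpecials (c :: r) =
      if c ≠ '(' ∧ c ≠ 'U' then c :: stripSpecials r else stripSpecials r := by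
  simp [stripSpecials, List.filter_cons]

-- stripSpecials through the split: the prefix is clean, the separator is special.
theorem stripSpecials_split (cs : List Char) (c0 : Char)
    (h : (splitFirstSpecial cs).2.1 = some c0) :
    stripSpecials cs = (splitFirstSpecial cs).1 ++ stripSpecials (splitFirstSpecial cs).2.2 := by
  induction cs with
  | nil => simp [splitFirstSpecial] at h
  | cons c r ih =>
    by_cases hc : c = '(' ∨ c = 'U'
    ·
      rcases hc with hc | hc <;> subst hc <;>
        simp [splitFirstSpecial, stripSpecials_cons]
    · have hc1 : c ≠ '(' := fun h' => hc (Or.inl h')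
      have hc2 : c ≠ 'U' := fun h' => hc (Or.inr h')
      simp [splitFirstSpecial, hc] at h ⊢
      simp [stripSpecials_cons, hc1, hc2, ih h]

-- when there is no special character, the prefix is the whole list
theorem splitFirstSpecial_none (cs : List Char)
    (h : (splitFirstSpecial cs).2.1 = none) : (splitFirstSpecial cs).1 = cs := by
  induction cs with
  | nil => rfl
  | cons c r ih =>
    by_cases hc : c = '(' ∨ c = 'U'
    · simp [splitFirstSpecial, hc] at h
    · simp [splitFirstSpecial, hc] at h ⊢
      exact ih h

-- a found separator is one of the two special characters
theorem splitFirstSpecial_char (cs : List Char) (c0 : Char)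
    (h : (splitFirstSpecial cs).2.1 = some c0) : c0 = '(' ∨ c0 = 'U' := by
  induction cs with
  | nil => simp [splitFirstSpecial] at h
  | cons c r ih =>
    by_cases hc : c = '(' ∨ c = 'U'
    · simp [splitFirstSpecial, hc] at h
      cases h; exact hc
    · simp [splitFirstSpecial, hc] at h
      exact ih h

-- with no special character, stripping is the identity
theorem stripSpecials_of_none (cs : List Char)
    (h : (splitFirstSpecial cs).2.1 = none) : stripSpecials cs = cs := by
  induction cs with
  | nil => rfl
  | cons c r ih =>
    by_cases hc : c = '(' ∨ c = 'U'
    · simp [splitFirstSpecial, hc] at h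
    · have hc1 : c ≠ '(' := fun h' => hc (Or.inl h')
      have hc2 : c ≠ 'U' := fun h' => hc (Or.inr h')
      simp [splitFirstSpecial, hc] at h
      simp [stripSpecials_cons, hc1, hc2, ih h]

-- A's loop once the suffix can never again become "(U"
theorem checkGo_dead (cs : List Char) :
    ∀ s suf : List Char, suf ≠ [] → suf ≠ ['('] →
      checkGo cs s suf = s ++ stripSpecials cs := by
  induction cs with
  | nil => intro s suf _ _; simp [checkGo, stripSpecials]
  | cons c r ih =>
    intro s suf h1 h2
    have hne : suf ++ [c] ≠ [] := by simp
    have hne2 : ∀ d : Char, suf ++ [d] ≠ ['('] := by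
      intro d h
      cases suf with
      | nil => exact h1 rfl
      | cons a t => simpa using congrArg List.length h
    by_cases hc : c = '('
    · simp only [checkGo, if_pos hc]
      rw [ih _ _ hne (hne2 c), stripSpecials_cons]
      simp [hc]
    · by_cases hu : c = 'U'
      · have hnb : suf ++ [c] ≠ ['(', 'U'] := by
          intro h
          apply h2
          cases suf with
          | nil => exact absurd rfl h1
          | cons a t =>
            cases t with
            | nil => simp at h; simp [h.1]
            | cons b t2 => simpa using congrArg List.length h
        simp only [checkGo, if_neg hc, if_pos hu, if_neg hnb]
        rw [ih _ _ hne (hne2 c), stripSpecials_cons]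
        simp [hu]
      · simp only [checkGo, if_neg hc, if_neg hu]
        rw [ih _ _ h1 h2, stripSpecials_cons]
        simp [hc, hu, List.append_assoc]

-- A's loop from suffix = "(": stop at the next 'U', go dead at the next '('.
theorem checkGo_one (cs : List Char) :
    ∀ s : List Char,
      checkGo cs s ['('] =
        s ++ (splitFirstSpecial cs).1 ++
          (if (splitFirstSpecial cs).2.1 = some '(' then
            stripSpecials (splitFirstSpecial cs).2.2 else []) := by
  induction cs with
  | nil => intro s; simp [checkGo, splitFirstSpecial]
  | cons c r ih =>
    intro s
    by_cases hc : c = '('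
    · subst hc
      rw [show checkGo ('(' :: r) s ['('] = checkGo r s (['('] ++ ['(']) from by
        simp [checkGo]]
      rw [checkGo_dead r s (['('] ++ ['(']) (by simp) (by simp)]
      simp [splitFirstSpecial]
    · by_cases hu : c = 'U'
      · subst hu
        simp only [checkGo]
        norm_num
        simp [splitFirstSpecial]
      · simp only [checkGo, if_neg hc, if_neg hu]
        rw [ih]
        have hns : ¬(c = '(' ∨ c = 'U') := by tauto
        simp [splitFirstSpecial, hns, List.append_assoc]

-- main loop lemma: A's loop from the initial state computes B's altCore
theorem checkGo_zero (cs : List Char) :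
    ∀ s : List Char, checkGo cs s [] = s ++ altCore cs := by
  induction cs with
  | nil => intro s; simp [checkGo, altCore, splitFirstSpecial]
  | cons c r ih =>
    intro s
    by_cases hc : c = '('
    · subst hc
      simp only [checkGo, List.nil_append]
      rw [checkGo_one]
      simp only [altCore, splitFirstSpecial]
      norm_num
      rcases hsep : (splitFirstSpecial r).2.1 with _ | c0
      · rw [splitFirstSpecial_none r hsep]
        simp [stripSpecials_of_none r hsep]
      · by_cases hcu : c0 = 'U'
        · simp [hcu]
        · by_cases hcp : c0 = '('
          · simp [hcp, stripSpecials_split r c0 (by rw [hsep])]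
          · rcases splitFirstSpecial_char r c0 hsep with h | h <;> exact absurd h (by assumption)
    · by_cases hu : c = 'U'
      · subst hu
        simp only [checkGo, if_neg hc]
        norm_num
        rw [checkGo_dead r s ['U'] (by simp) (by simp)]
        simp [altCore, splitFirstSpecial]
      · simp only [checkGo, if_neg hc, if_neg hu]
        rw [ih]
        have hns : ¬(c = '(' ∨ c = 'U') := by tauto
        have halt : altCore (c :: r) = c :: altCore r := by
          by_cases h1 : (splitFirstSpecial r).2.1 = some '('
          · by_cases h2 : (splitFirstSpecial (splitFirstSpecial r).2.2).2.1 = some 'U' <;>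
              simp [altCore, splitFirstSpecial, hns, h1, h2]
          · by_cases h2 : (splitFirstSpecial r).2.1 = none <;>
              simp [altCore, splitFirstSpecial, hns, h1, h2]
        rw [halt]
        simp [List.append_assoc]

-- ===== VERDICT (by name: the statement is the Claim_ definition above) =====
theorem check_spec : Claim_equal_check := by
  intro line _
  unfold Spec_check check check_alt
  rw [checkGo_zero]
  simp
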